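-- pv_equiv track=rewrite | github.com/RHUDHRESH/Raptorflow | backend/middleware/rate_limit.py | _get_endpoint_pattern
-- ===== SOURCE A (Python) =====
-- class RateLimitConfig:
--     """Rate limit configuration"""
--
--     # Requests per minute by endpoint pattern
--     LIMITS = {
--         "/api/v1/auth/login": 5,  # 5 attempts per minute
--         "/api/v1/auth/register": 3,  # 3 signups per minute
--         "/api/v1/auth/password-reset": 3,  # 3 reset requests per minute
--         "/api/v1/auth/refresh": 10,  # 10 refreshes per minute
--         "/api/v1": 100,  # 100 general API requests per minute
--     }
--
--     # Time window in seconds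
--     WINDOW = 60
--
--     # Lockout duration after exceeding limit (in seconds)
--     LOCKOUT_DURATION = 900  # 15 minutes
--
-- def _get_endpoint_pattern(path: str) -> str:
--     """Get the most specific rate limit pattern for a path"""
--     # Check for exact matches first
--     if path in RateLimitConfig.LIMITS:
--         return path
--
--     # Check for prefix matches (longest first)
--     patterns = sorted(RateLimitConfig.LIMITS.keys(), key=len, reverse=True)
--     for pattern in patterns:
--         if path.startswith(pattern):
--             return pattern
--
--     return "/api/v1"  # Default pattern
-- ===== SOURCE B (Python) =====
-- class RateLimitConfig:
--     """Rate limit configuration"""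
--
--     LIMITS = {
--         "/api/v1/auth/login": 5,
--         "/api/v1/auth/register": 3,
--         "/api/v1/auth/password-reset": 3,
--         "/api/v1/auth/refresh": 10,
--         "/api/v1": 100,
--     }
--
--     WINDOW = 60
--     LOCKOUT_DURATION = 900
--
--
-- def _get_endpoint_pattern(path: str) -> str:
--     """Get the most specific rate limit pattern for a path"""
--     candidates = [p for p in RateLimitConfig.LIMITS if path.startswith(p)]
--     if candidates:
--         return max(candidates, key=len)
--     return "/api/v1"
-- ===== Notes on version B (the rewrite author's own statement) =====
-- stated objective: simpler
-- what changed: B drops A's separate exact-match guard and its descending length sort: it filters the patterns that prefix the path in one pass over the dict and returns the longest with max(key=len) (exact matches are subsumed by longest-prefix).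
import Mathlib
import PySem

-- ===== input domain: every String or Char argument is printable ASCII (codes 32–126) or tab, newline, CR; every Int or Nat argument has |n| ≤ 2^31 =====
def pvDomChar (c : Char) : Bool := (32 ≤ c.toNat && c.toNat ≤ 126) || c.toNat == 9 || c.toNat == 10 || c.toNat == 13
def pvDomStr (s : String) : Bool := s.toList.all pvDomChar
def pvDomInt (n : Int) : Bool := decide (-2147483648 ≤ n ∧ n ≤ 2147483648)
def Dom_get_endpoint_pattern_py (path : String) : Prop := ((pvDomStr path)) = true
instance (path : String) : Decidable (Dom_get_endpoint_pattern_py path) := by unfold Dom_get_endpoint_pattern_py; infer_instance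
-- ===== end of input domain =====

-- B drops the exact-match guard and the sort: one filter pass, then max(key=len); objective: simpler.

-- ===== PORT A =====
-- keys of RateLimitConfig.LIMITS in dict insertion order
def rateLimitKeys : List String :=
  ["/api/v1/auth/login", "/api/v1/auth/register", "/api/v1/auth/password-reset",
   "/api/v1/auth/refresh", "/api/v1"]

-- the 'for pattern in patterns: if path.startswith(pattern): return pattern' loop
def patternLoop (path : String) : List String → String
  | [] => "/api/v1"
  | p :: rest => if PySem.Str.startswith path p then p else patternLoop path rest

def get_endpoint_pattern_py (path : String) : String :=
  if rateLimitKeys.contains path then path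
  else
    patternLoop path (PySem.List.sorted rateLimitKeys (fun p => (PySem.Str.len p : Int)) true)

-- ===== PORT B =====
def get_endpoint_pattern_py_alt (path : String) : String :=
  let candidates := rateLimitKeys.filter (fun p => PySem.Str.startswith path p)
  match PySem.List.max? candidates (fun p => (PySem.Str.len p : Int)) with
  | some m => m
  | none => "/api/v1"

-- ===== PRECONDITION & SPEC =====
def Spec_get_endpoint_pattern_py (path : String) (out : String) : Prop := out = get_endpoint_pattern_py_alt path
instance (path : String) (out : String) : Decidable (Spec_get_endpoint_pattern_py path out) := by unfold Spec_get_endpoint_pattern_py; infer_instance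

-- ===== CLAIM (what is proved, stated in full; the proofs are below) =====
def Claim_equal_get_endpoint_pattern_py : Prop := ∀ (path : String), Dom_get_endpoint_pattern_py path → Spec_get_endpoint_pattern_py path (get_endpoint_pattern_py path)

-- ===== LEMMAS AND PROOFS =====

-- the sorted key order A iterates over, named once
theorem sortedKeys_eq :
    PySem.List.sorted rateLimitKeys (fun p => (PySem.Str.len p : Int)) true =
      ["/api/v1/auth/password-reset", "/api/v1/auth/register", "/api/v1/auth/refresh",
       "/api/v1/auth/login", "/api/v1"] := by
  decide

-- ===== VERDICT (by name: the statement is the Claim_ definition above) =====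
theorem get_endpoint_pattern_py_spec : Claim_equal_get_endpoint_pattern_py := by
  intro path _
  unfold Spec_get_endpoint_pattern_py get_endpoint_pattern_py get_endpoint_pattern_py_alt
  by_cases hc : rateLimitKeys.contains path
  · simp only [rateLimitKeys, List.contains_eq_mem, List.mem_cons, List.not_mem_nil,
      or_false, decide_eq_true_eq] at hc
    rcases hc with h | h | h | h | h <;> subst h <;> decide
  · rw [if_neg hc, sortedKeys_eq]
    by_cases h1 : PySem.Chars.startswith path.toList ['/', 'a', 'p', 'i', '/', 'v', '1', '/', 'a', 'u', 't', 'h', '/', 'l', 'o', 'g', 'i', 'n'] = true <;>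
    by_cases h2 : PySem.Chars.startswith path.toList ['/', 'a', 'p', 'i', '/', 'v', '1', '/', 'a', 'u', 't', 'h', '/', 'r', 'e', 'g', 'i', 's', 't', 'e', 'r'] = true <;>
    by_cases h3 : PySem.Chars.startswith path.toList ['/', 'a', 'p', 'i', '/', 'v', '1', '/', 'a', 'u', 't', 'h', '/', 'p', 'a', 's', 's', 'w', 'o', 'r', 'd', '-', 'r', 'e', 's', 'e', 't'] = true <;>
    by_cases h4 : PySem.Chars.startswith path.toList ['/', 'a', 'p', 'i', '/', 'v', '1', '/', 'a', 'u', 't', 'h', '/', 'r', 'e', 'f', 'r', 'e', 's', 'h'] = true <;>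
    by_cases h5 : PySem.Chars.startswith path.toList ['/', 'a', 'p', 'i', '/', 'v', '1'] = true <;>
    simp [patternLoop, rateLimitKeys, List.filter, PySem.List.max?, h1, h2, h3, h4, h5] <;> decide
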